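-- pv_equiv track=rewrite | github.com/orlando-code/NREE_persistence_reef_structures_meta_analysis | calcification_meta_analysis/utils/utils.py | uniquify_repeated_values
-- ===== SOURCE A (Python) =====
-- import string
--
-- def uniquify_repeated_values(vals: list, uniquify_str: str = "LOC") -> list:
--     """
--     Append a unique suffix to repeated values in a list.
--
--     Parameters:
--         vals (list): List of values.
--
--     Returns:
--         list: List of values with unique suffixes.
--     """
--     from collections import Counter, defaultdict
--
--     # precompute counts for all values to avoid repeated .count() calls
--     value_counts = Counter(vals)
--     counts = defaultdict(int)
--     result = []
--     for val in vals:
--         count = counts[val]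
--         if value_counts[val] > 1:
--             suffix = f"-{uniquify_str}-{string.ascii_uppercase[count]}"
--         else:
--             suffix = ""
--         result.append(f"{val}{suffix}")
--         counts[val] += 1
--     return result
-- ===== SOURCE B (Python) =====
-- import string
--
--
-- def uniquify_repeated_values(vals: list, uniquify_str: str = "LOC") -> list:
--     # Group-then-write: first bucket the positions of each value, then fill a
--     # preallocated result list group by group (unique values verbatim, repeated
--     # groups with letter suffixes by rank within the group).
--     groups = {}
--     for i, v in enumerate(vals):
--         groups.setdefault(v, []).append(i)
--     result = [""] * len(vals)
--     for v, idxs in groups.items():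
--         if len(idxs) == 1:
--             result[idxs[0]] = v
--         else:
--             for k, i in enumerate(idxs):
--                 result[i] = f"{v}-{uniquify_str}-{string.ascii_uppercase[k]}"
--     return result
-- ===== Notes on version B (the rewrite author's own statement) =====
-- stated objective: alternative
-- what changed: Replaces A's single streaming pass with running per-value counters by a group-then-write scheme: one pass buckets the positions of each value into a dict of index lists, then a second phase fills a preallocated result list group by group, writing unique values verbatim and suffixing repeated groups by rank within their index list.
import Mathlib
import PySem

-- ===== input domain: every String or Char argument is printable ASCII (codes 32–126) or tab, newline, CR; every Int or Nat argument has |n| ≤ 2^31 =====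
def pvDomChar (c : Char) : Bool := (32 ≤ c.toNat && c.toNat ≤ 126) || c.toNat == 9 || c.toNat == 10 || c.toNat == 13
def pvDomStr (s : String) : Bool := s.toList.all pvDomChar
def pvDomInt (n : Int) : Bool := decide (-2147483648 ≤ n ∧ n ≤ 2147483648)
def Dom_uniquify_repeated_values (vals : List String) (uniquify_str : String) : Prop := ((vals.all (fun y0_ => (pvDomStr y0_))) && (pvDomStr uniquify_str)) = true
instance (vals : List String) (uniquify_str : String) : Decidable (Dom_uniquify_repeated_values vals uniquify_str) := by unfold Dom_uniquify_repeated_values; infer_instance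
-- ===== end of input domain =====

-- B replaces A's streaming pass (running per-value counters) by a group-then-write scheme:
-- bucket the positions of each value, then fill a preallocated result per group; objective: alternative.


-- string.ascii_uppercase
def pyAsciiUppercase : List Char := "ABCDEFGHIJKLMNOPQRSTUVWXYZ".toList

-- ===== PORT A =====
-- A: value_counts = Counter(vals); counts = defaultdict(int); streaming loop appending val+suffix.
-- string.ascii_uppercase[count] raises IndexError for count ≥ 26: pyGet? is none there (excluded by Pre_);
-- the .getD "" default is never reached inside Pre_.
def uniquify_repeated_values (vals : List String) (uniquify_str : String) : List String :=
  let value_counts : PySem.Dict String Int := PySem.Dict.counter vals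
  (List.foldl
    (fun (st : PySem.Dict String Int × List String) val =>
      let count : Int := st.1.getD val 0
      let suffix : String :=
        if value_counts.getD val 0 > 1 then
          "-" ++ uniquify_str ++ "-" ++
            (((PySem.List.pyGet? pyAsciiUppercase count).map (fun c => String.ofList [c])).getD "")
        else ""
      (st.1.insert val (count + 1), st.2 ++ [val ++ suffix]))
    ((PySem.Dict.empty : PySem.Dict String Int), ([] : List String)) vals).2

-- ===== PORT B =====
-- B: groups = {} filled by groups.setdefault(v, []).append(i) over enumerate(vals) (= Dict.modify with
-- default []); result = [""] * len(vals); then per (v, idxs) in groups.items() write into result.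
-- Indices come from enumerate so result[i] = … is always in range: pySetD is exact there. idxs[0] is
-- pyGet? (its .getD 0 default is unreachable: the branch has len(idxs) == 1); ascii_uppercase[k] as in
-- A's port (IndexError excluded by Pre_).
def uniquify_repeated_values_alt (vals : List String) (uniquify_str : String) : List String :=
  let groups : PySem.Dict String (List Int) :=
    (PySem.List.enumerate vals 0).foldl (fun d p => d.modify p.2 [] (· ++ [p.1])) PySem.Dict.empty
  let result : List String := List.replicate vals.length ""
  groups.items.foldl
    (fun res kv =>
      if kv.2.length == 1 then
        PySem.List.pySetD res ((PySem.List.pyGet? kv.2 0).getD 0) kv.1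
      else
        (PySem.List.enumerate kv.2 0).foldl
          (fun r p =>
            PySem.List.pySetD r p.2
              (kv.1 ++ "-" ++ uniquify_str ++ "-" ++
                (((PySem.List.pyGet? pyAsciiUppercase p.1).map (fun c => String.ofList [c])).getD "")))
          res)
    result

-- ===== PRECONDITION & SPEC =====
-- Pre_ excludes exactly the inputs on which Python A raises IndexError: a value occurring more
-- than 26 times (string.ascii_uppercase[count] with count ≥ 26). Python B raises there too.
def Pre_uniquify_repeated_values (vals : List String) (uniquify_str : String) : Prop :=
  ∀ v ∈ vals, List.count v vals ≤ 26
instance (vals : List String) (uniquify_str : String) : Decidable (Pre_uniquify_repeated_values vals uniquify_str) := by unfold Pre_uniquify_repeated_values; infer_instance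

def pvWitness_uniquify_repeated_values : List String × String := (["a", "b", "a"], "LOC")

def Spec_uniquify_repeated_values (vals : List String) (uniquify_str : String) (out : List String) : Prop := out = uniquify_repeated_values_alt vals uniquify_str
instance (vals : List String) (uniquify_str : String) (out : List String) : Decidable (Spec_uniquify_repeated_values vals uniquify_str out) := by unfold Spec_uniquify_repeated_values; infer_instance

-- ===== CLAIM (what is proved, stated in full; the proofs are below) =====
def Claim_equal_uniquify_repeated_values : Prop := ∀ (vals : List String) (uniquify_str : String), Dom_uniquify_repeated_values vals uniquify_str → Pre_uniquify_repeated_values vals uniquify_str → Spec_uniquify_repeated_values vals uniquify_str (uniquify_repeated_values vals uniquify_str)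

-- ===== LEMMAS AND PROOFS =====

-- The pointwise value both programs compute at position m.
def pvElem (vals : List String) (us : String) (m : Nat) : String :=
  let v := vals.getD m ""
  if List.count v vals == 1 then v
  else v ++ "-" ++ us ++ "-" ++
    (((PySem.List.pyGet? pyAsciiUppercase (((vals.take m).count v : Nat) : Int)).map
      (fun c => String.ofList [c])).getD "")

def pvSpec (vals : List String) (us : String) : List String :=
  (List.range vals.length).map (pvElem vals us)

-- ---------- A's side ----------

-- A's streaming spine: element for value v after prefix `done`.
def pvCore (vals : List String) (us : String) (done todo : List String) : List String :=
  match todo with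
  | [] => []
  | v :: td =>
    (if List.count v vals == 1 then v
     else v ++ "-" ++ us ++ "-" ++
       (((PySem.List.pyGet? pyAsciiUppercase ((List.count v done : Nat) : Int)).map
          (fun c => String.ofList [c])).getD "")) :: pvCore vals us (done ++ [v]) td

-- A's loop, with the counts dict holding the prefix counts, produces pvCore.
lemma pvA_loop (vals : List String) (us : String) :
    ∀ (todo done : List String) (d : PySem.Dict String Int) (acc : List String),
      (∀ v ∈ todo, v ∈ vals) →
      (∀ v, d.getD v 0 = (List.count v done : Int)) →
      (List.foldl
        (fun (st : PySem.Dict String Int × List String) val =>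
          let count : Int := st.1.getD val 0
          let suffix : String :=
            if (PySem.Dict.counter vals).getD val 0 > 1 then
              "-" ++ us ++ "-" ++
                (((PySem.List.pyGet? pyAsciiUppercase count).map (fun c => String.ofList [c])).getD "")
            else ""
          (st.1.insert val (count + 1), st.2 ++ [val ++ suffix]))
        (d, acc) todo).2 = acc ++ pvCore vals us done todo := by
  intro todo
  induction todo with
  | nil => intro done d acc _ _; simp [pvCore]
  | cons v td ih =>
    intro done d acc hmem hd
    simp only [List.foldl_cons]
    rw [ih (done ++ [v]) _ _ (fun w hw => hmem w (List.mem_cons_of_mem _ hw))]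
    · have hv : v ∈ vals := hmem v (List.mem_cons_self ..)
      have hc1 : 1 ≤ List.count v vals := List.one_le_count_iff.mpr hv
      simp only [pvCore, PySem.Dict.getD_counter, hd v]
      by_cases h1 : List.count v vals = 1
      · simp [h1, String.append_empty]
      · have hgt : (1 : Int) < (List.count v vals : Int) := by
          have : 1 < List.count v vals := lt_of_le_of_ne hc1 (fun h => h1 h.symm)
          exact_mod_cast this
        simp [h1, hgt, String.append_assoc]
    · intro w
      rw [PySem.Dict.getD_insert, hd w]
      by_cases hw : w = v
      · subst hw
        rw [hd w]
        simp [List.count_append]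
      · simp [hw, List.count_append, Ne.symm hw]

-- pvCore over the actual prefix/suffix split is the pointwise spec.
lemma pvCore_eq_spec (vals : List String) (us : String) :
    ∀ (todo done : List String), done ++ todo = vals →
      pvCore vals us done todo = (List.range' done.length todo.length).map (pvElem vals us) := by
  intro todo
  induction todo with
  | nil => intro done _; simp [pvCore]
  | cons v td ih =>
    intro done hpre
    have hget : vals.getD done.length "" = v := by
      rw [← hpre]
      simp [List.getD]
    have htake : vals.take done.length = done := by
      rw [← hpre]; simp
    rw [List.length_cons, List.range'_succ, List.map_cons]
    simp only [pvCore]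
    congr 1
    · simp only [pvElem, hget, htake]
    · have := ih (done ++ [v]) (by simpa using hpre)
      simpa using this

-- ---------- B's side ----------

-- Occurrence-rank/position pairs of k in a suffix, scanning left to right.
def pvPos (l : List String) (k : String) (i j : Nat) : List (Nat × Nat) :=
  match l with
  | [] => []
  | v :: t => if v = k then (j, i) :: pvPos t k (i + 1) (j + 1) else pvPos t k (i + 1) j

lemma pvPos_length (k : String) : ∀ (l : List String) (i j : Nat),
    (pvPos l k i j).length = List.count k l := by
  intro l
  induction l with
  | nil => intro i j; simp [pvPos]
  | cons v t ih =>
    intro i j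
    by_cases h : v = k
    · simp [pvPos, h, ih]
    · simp [pvPos, h, ih]

lemma pvPos_shift (k : String) : ∀ (l : List String) (i j : Nat),
    pvPos l k i j = (pvPos l k i 0).map (fun q => (q.1 + j, q.2)) := by
  intro l
  induction l with
  | nil => intro i j; simp [pvPos]
  | cons v t ih =>
    intro i j
    by_cases h : v = k
    · simp only [pvPos, if_pos h, List.map_cons]
      rw [ih (i+1) (j+1), ih (i+1) 1, List.map_map]
      simp only [Nat.zero_add]
      congr 1
      apply List.map_congr_left; intro q _; simp [Function.comp]; omega
    · simp only [pvPos, if_neg h]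
      rw [ih (i+1) j]

-- the bucketed index list of k, as produced by the grouping fold
def pvIdxs (vals : List String) (k : String) : List Int :=
  ((PySem.List.enumerate vals 0).filter (fun p => p.2 == k)).map (·.1)

lemma pvEnum_filter (k : String) : ∀ (l : List String) (i : Nat),
    ((PySem.List.enumerate l (i : Int)).filter (fun p => p.2 == k)).map (·.1)
      = (pvPos l k i 0).map (fun q => ((q.2 : Nat) : Int)) := by
  intro l
  induction l with
  | nil => intro i; simp [PySem.List.enumerate, pvPos]
  | cons v t ih =>
    intro i
    rw [PySem.List.enumerate_cons]
    by_cases h : v = k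
    · have hb : (v == k) = true := by simp [h]
      simp only [List.filter_cons, hb, if_true, List.map_cons, pvPos, if_pos h]
      have : ((i : Int) + 1) = ((i + 1 : Nat) : Int) := by push_cast; ring
      rw [this, ih (i+1)]
      congr 1
      have h1 : (pvPos t k (i+1) 1).map (fun q => ((q.2 : Nat) : Int))
          = (pvPos t k (i+1) 0).map (fun q => ((q.2 : Nat) : Int)) := by
        rw [pvPos_shift k t (i+1) 1, List.map_map]; rfl
      rw [h1]
    · have hb : (v == k) = false := by simp [h]
      simp only [List.filter_cons, hb, Bool.false_eq_true, if_false, pvPos, if_neg h]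
      have : ((i : Int) + 1) = ((i + 1 : Nat) : Int) := by push_cast; ring
      rw [this, ih (i+1)]

lemma pvEnum_pvPos (k : String) : ∀ (l : List String) (i j : Nat),
    PySem.List.enumerate ((pvPos l k i j).map (fun q => ((q.2 : Nat) : Int))) (j : Int)
      = (pvPos l k i j).map (fun q => ((q.1 : Int), (q.2 : Int))) := by
  intro l
  induction l with
  | nil => intro i j; simp [pvPos]
  | cons v t ih =>
    intro i j
    by_cases h : v = k
    · simp only [pvPos, if_pos h, List.map_cons]
      rw [PySem.List.enumerate_cons]
      have : ((j : Int) + 1) = ((j + 1 : Nat) : Int) := by push_cast; ring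
      rw [this, ih (i+1) (j+1)]
    · simp only [pvPos, if_neg h]
      exact ih (i+1) j

lemma pvPos_mem (k : String) (vals : List String) :
    ∀ (todo done : List String), done ++ todo = vals →
      ∀ q ∈ pvPos todo k done.length (done.count k),
        q.2 < vals.length ∧ vals.getD q.2 "" = k ∧ (vals.take q.2).count k = q.1 := by
  intro todo
  induction todo with
  | nil => intro done _ q hq; simp [pvPos] at hq
  | cons v t ih =>
    intro done hpre q hq
    have htail := ih (done ++ [v]) (by simpa using hpre)
    by_cases h : v = k
    · rw [pvPos, if_pos h] at hq
      rcases List.mem_cons.mp hq with rfl | hq'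
      · refine ⟨?_, ?_, ?_⟩
        · rw [← hpre]; simp
        · rw [← hpre]; simp [List.getD, h]
        · rw [← hpre]; simp
      · have : pvPos t k ((done ++ [v]).length) ((done ++ [v]).count k) =
            pvPos t k (done.length + 1) (done.count k + 1) := by
          simp [List.count_append, h]
        exact htail q (by rw [this]; exact hq')
    · rw [pvPos, if_neg h] at hq
      have : pvPos t k ((done ++ [v]).length) ((done ++ [v]).count k) =
          pvPos t k (done.length + 1) (done.count k) := by
        simp [List.count_append, h]
      exact htail q (by rw [this]; exact hq)

lemma pvPos_cover (k : String) (vals : List String) :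
    ∀ (todo done : List String), done ++ todo = vals →
      ∀ m : Nat, done.length ≤ m → m < vals.length → vals.getD m "" = k →
        ((vals.take m).count k, m) ∈ pvPos todo k done.length (done.count k) := by
  intro todo
  induction todo with
  | nil =>
    intro done hpre m h1 h2 _
    exfalso; rw [← hpre] at h2; simp at h2; omega
  | cons v t ih =>
    intro done hpre m h1 h2 hk
    have htail := ih (done ++ [v]) (by simpa using hpre)
    by_cases hm : m = done.length
    · subst hm
      have hv : v = k := by
        rw [← hpre] at hk
        simpa [List.getD] using hk
      rw [pvPos, if_pos hv]
      have : (vals.take done.length).count k = done.count k := by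
        rw [← hpre]; simp
      rw [this]
      exact List.mem_cons_self ..
    · have hlt : done.length + 1 ≤ m := by omega
      have hmem := htail m (by simpa using hlt) h2 hk
      by_cases h : v = k
      · rw [pvPos, if_pos h]
        apply List.mem_cons_of_mem
        have : pvPos t k ((done ++ [v]).length) ((done ++ [v]).count k) =
            pvPos t k (done.length + 1) (done.count k + 1) := by
          simp [List.count_append, h]
        rw [this] at hmem; exact hmem
      · rw [pvPos, if_neg h]
        have : pvPos t k ((done ++ [v]).length) ((done ++ [v]).count k) =
            pvPos t k (done.length + 1) (done.count k) := by
          simp [List.count_append, h]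
        rw [this] at hmem; exact hmem

-- the grouping fold: lookup and items characterization
lemma pvGroups_getD (vals : List String) (k : String) :
    ((PySem.List.enumerate vals 0).foldl (fun d p => d.modify p.2 [] (· ++ [p.1]))
      (PySem.Dict.empty : PySem.Dict String (List Int))).getD k [] = pvIdxs vals k := by
  have hswap : (PySem.List.enumerate vals 0).foldl (fun d p => d.modify p.2 [] (· ++ [p.1]))
      (PySem.Dict.empty : PySem.Dict String (List Int))
      = (((PySem.List.enumerate vals 0).map Prod.swap).foldl
          (fun d q => d.modify q.1 [] (· ++ [q.2])) PySem.Dict.empty) := by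
    exact (List.foldl_map (f := Prod.swap) (g := fun d q => d.modify q.1 [] (· ++ [q.2])) (l := PySem.List.enumerate vals 0) (init := PySem.Dict.empty)).symm
  rw [hswap, PySem.Dict.getD_foldl_modify_append]
  rw [List.filter_map, List.map_map]
  simp only [PySem.Dict.getD_empty, List.nil_append, pvIdxs]
  rfl

lemma pvGroups_items (vals : List String) :
    ((PySem.List.enumerate vals 0).foldl (fun d p => d.modify p.2 [] (· ++ [p.1]))
      (PySem.Dict.empty : PySem.Dict String (List Int))).items
    = (PySem.Set.ofList vals).map (fun k => (k, pvIdxs vals k)) := by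
  have hnd : ((PySem.List.enumerate vals 0).foldl (fun d p => d.modify p.2 [] (· ++ [p.1]))
      (PySem.Dict.empty : PySem.Dict String (List Int))).keys.Nodup := by
    exact PySem.Dict.nodup_keys_foldl_modify_key _ _ _ _ _ PySem.Dict.nodup_keys_empty
  rw [PySem.Dict.items_eq_map_keys _ hnd []]
  have hkeys : ((PySem.List.enumerate vals 0).foldl (fun d p => d.modify p.2 [] (· ++ [p.1]))
      (PySem.Dict.empty : PySem.Dict String (List Int))).keys = PySem.Set.ofList vals := by
    rw [PySem.Dict.keys_foldl_modify_key]
    rw [PySem.List.map_snd_enumerate]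
    rfl
  rw [hkeys]
  apply List.map_congr_left
  intro k _
  rw [pvGroups_getD]

-- the write list of one group
def pvWrites (us : String) (kv : String × List Int) : List (Int × String) :=
  if kv.2.length == 1 then [(((PySem.List.pyGet? kv.2 0).getD 0), kv.1)]
  else (PySem.List.enumerate kv.2 0).map
    (fun p => (p.2, kv.1 ++ "-" ++ us ++ "-" ++
      (((PySem.List.pyGet? pyAsciiUppercase p.1).map (fun c => String.ofList [c])).getD "")))

-- fold of writes evaluation
lemma pvFold_set_eval (F : Nat → String) (n : Nat) :
    ∀ (W : List (Int × String)) (r : List String),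
      (∀ p ∈ W, ∃ m : Nat, p.1 = (m : Int) ∧ m < n ∧ p.2 = F m) →
      r.length = n →
      (W.foldl (fun r p => PySem.List.pySetD r p.1 p.2) r).length = n ∧
      ∀ m : Nat, m < n →
        (W.foldl (fun r p => PySem.List.pySetD r p.1 p.2) r)[m]? =
          if ∃ p ∈ W, p.1 = (m : Int) then some (F m) else r[m]? := by
  intro W
  induction W with
  | nil => intro r _ hr; simp [hr]
  | cons p W ih =>
    intro r hW hr
    obtain ⟨m0, hp1, hm0, hp2⟩ := hW p (List.mem_cons_self ..)
    have hr' : (PySem.List.pySetD r p.1 p.2).length = n := by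
      rw [hp1, PySem.List.pySetD_natCast, List.length_set, hr]
    obtain ⟨hlen, hget⟩ := ih (PySem.List.pySetD r p.1 p.2)
      (fun q hq => hW q (List.mem_cons_of_mem _ hq)) hr'
    simp only [List.foldl_cons]
    refine ⟨hlen, ?_⟩
    intro m hm
    rw [hget m hm]
    by_cases htail : ∃ q ∈ W, q.1 = (m : Int)
    · rw [if_pos htail]
      obtain ⟨q, hq, hq1⟩ := htail
      rw [if_pos ⟨q, List.mem_cons_of_mem _ hq, hq1⟩]
    · rw [if_neg htail]
      by_cases hhead : p.1 = (m : Int)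
      · have hmm : m = m0 := by rw [hp1] at hhead; exact_mod_cast hhead.symm
        rw [if_pos ⟨p, List.mem_cons_self .., hhead⟩]
        rw [hp1, PySem.List.pySetD_natCast, hp2, hmm]
        exact List.getElem?_set_self (by rw [hr]; omega)
      · rw [if_neg ?_]
        · rw [hp1, PySem.List.pySetD_natCast, List.getElem?_set_ne]
          intro hmn
          apply hhead
          rw [hp1, hmn]
        · rintro ⟨q, hq, hq1⟩
          rcases List.mem_cons.mp hq with rfl | hq'
          · exact hhead hq1
          · exact htail ⟨q, hq', hq1⟩

-- the bucketed index list is exactly the (rank, position) table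
lemma pvIdxs_eq (vals : List String) (k : String) :
    pvIdxs vals k = (pvPos vals k 0 0).map (fun q => ((q.2 : Nat) : Int)) := by
  have := pvEnum_filter k vals 0
  simpa [pvIdxs] using this

lemma pvPos_mem0 (k : String) (vals : List String) :
    ∀ q ∈ pvPos vals k 0 0,
      q.2 < vals.length ∧ vals.getD q.2 "" = k ∧ (vals.take q.2).count k = q.1 := by
  have := pvPos_mem k vals vals [] rfl
  simpa using this

-- every write touched by B writes the pointwise spec value at its own (in-range) position
lemma pvWrites_sound (vals : List String) (us : String) (k : String) :
    ∀ p ∈ pvWrites us (k, pvIdxs vals k),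
      ∃ m : Nat, p.1 = (m : Int) ∧ m < vals.length ∧ p.2 = pvElem vals us m := by
  intro p hp
  unfold pvWrites at hp
  simp only at hp
  have hlen : (pvIdxs vals k).length = List.count k vals := by
    rw [pvIdxs_eq, List.length_map, pvPos_length]
  by_cases h1 : (pvIdxs vals k).length = 1
  · rw [if_pos (by simpa using h1)] at hp
    have hcnt : List.count k vals = 1 := by rw [← hlen]; exact h1
    have hplen : (pvPos vals k 0 0).length = 1 := by rw [pvPos_length]; exact hcnt
    obtain ⟨a, ha⟩ := List.length_eq_one_iff.mp hplen
    have hidx : pvIdxs vals k = [((a.2 : Nat) : Int)] := by rw [pvIdxs_eq, ha]; rfl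
    obtain ⟨hm1, hm2, hm3⟩ := pvPos_mem0 k vals a (by rw [ha]; exact List.mem_cons_self ..)
    have hp' : p = (((PySem.List.pyGet? (pvIdxs vals k) 0).getD 0), k) := List.mem_singleton.mp hp
    refine ⟨a.2, ?_, hm1, ?_⟩
    · rw [hp', hidx]
      simp
    · rw [hp']
      simp only [pvElem, hm2, hcnt]
      simp
  · rw [if_neg (by simpa using h1)] at hp
    rw [pvIdxs_eq] at hp
    have he := pvEnum_pvPos k vals 0 0
    simp only [Nat.cast_zero] at he
    rw [he, List.map_map] at hp
    obtain ⟨q, hq, rfl⟩ := List.mem_map.mp hp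
    obtain ⟨hm1, hm2, hm3⟩ := pvPos_mem0 k vals q hq
    have hcnt : List.count k vals ≠ 1 := by rw [← hlen]; exact h1
    refine ⟨q.2, rfl, hm1, ?_⟩
    simp only [pvElem, hm2, hm3, Function.comp]
    simp [hcnt]

-- every position is written by its value's group
lemma pvWrites_cover (vals : List String) (us : String) (m : Nat) (hm : m < vals.length) :
    ∃ p ∈ pvWrites us (vals.getD m "", pvIdxs vals (vals.getD m "")), p.1 = (m : Int) := by
  set k := vals.getD m "" with hk
  have hq : ((vals.take m).count k, m) ∈ pvPos vals k 0 0 := by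
    have := pvPos_cover k vals vals [] rfl m (Nat.zero_le _) hm hk.symm
    simpa using this
  unfold pvWrites
  simp only
  have hlen : (pvIdxs vals k).length = List.count k vals := by
    rw [pvIdxs_eq, List.length_map, pvPos_length]
  by_cases h1 : (pvIdxs vals k).length = 1
  · rw [if_pos (by simpa using h1)]
    have hplen : (pvPos vals k 0 0).length = 1 := by
      rw [pvPos_length, ← hlen]; exact h1
    obtain ⟨a, ha⟩ := List.length_eq_one_iff.mp hplen
    have haq : a = ((vals.take m).count k, m) := by
      rw [ha] at hq; exact (List.mem_singleton.mp hq).symm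
    have hidx : pvIdxs vals k = [((m : Nat) : Int)] := by
      rw [pvIdxs_eq, ha, haq]
      simp
    refine ⟨_, List.mem_singleton.mpr rfl, ?_⟩
    rw [hidx]
    simp
  · rw [if_neg (by simpa using h1)]
    rw [pvIdxs_eq]
    have he := pvEnum_pvPos k vals 0 0
    simp only [Nat.cast_zero] at he
    rw [he, List.map_map]
    refine ⟨_, List.mem_map_of_mem hq, rfl⟩

lemma pvB_eq_spec (vals : List String) (us : String) :
    uniquify_repeated_values_alt vals us = pvSpec vals us := by
  have hbody : ∀ (res : List String) (kv : String × List Int),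
      (if kv.2.length == 1 then
        PySem.List.pySetD res ((PySem.List.pyGet? kv.2 0).getD 0) kv.1
      else
        (PySem.List.enumerate kv.2 0).foldl
          (fun r p =>
            PySem.List.pySetD r p.2
              (kv.1 ++ "-" ++ us ++ "-" ++
                (((PySem.List.pyGet? pyAsciiUppercase p.1).map (fun c => String.ofList [c])).getD "")))
          res)
      = (pvWrites us kv).foldl (fun r p => PySem.List.pySetD r p.1 p.2) res := by
    intro res kv
    unfold pvWrites
    by_cases h : kv.2.length == 1
    · rw [if_pos h, if_pos h]; rfl
    · rw [if_neg h, if_neg h, List.foldl_map]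
  simp only [uniquify_repeated_values_alt]
  rw [pvGroups_items]
  simp only [hbody]
  rw [← List.foldl_flatMap]
  have hsound : ∀ p ∈ ((PySem.Set.ofList vals).map (fun k => (k, pvIdxs vals k))).flatMap (pvWrites us),
      ∃ m : Nat, p.1 = (m : Int) ∧ m < vals.length ∧ p.2 = pvElem vals us m := by
    intro p hp
    obtain ⟨kv, hkv, hpkv⟩ := List.mem_flatMap.mp hp
    obtain ⟨k, hkmem, rfl⟩ := List.mem_map.mp hkv
    exact pvWrites_sound vals us k p hpkv
  obtain ⟨hlen, hget⟩ := pvFold_set_eval (pvElem vals us) vals.length _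
    (List.replicate vals.length "") hsound (by simp)
  apply List.ext_getElem?
  intro i
  by_cases hi : i < vals.length
  · rw [hget i hi]
    rw [if_pos ?cov]
    · simp [pvSpec, hi]
    case cov =>
      obtain ⟨p, hp, hp1⟩ := pvWrites_cover vals us i hi
      have hkmem : vals.getD i "" ∈ vals := by
        rw [List.getD_eq_getElem vals "" hi]
        exact List.getElem_mem hi
      refine ⟨p, List.mem_flatMap.mpr ⟨(vals.getD i "", pvIdxs vals (vals.getD i "")),
        List.mem_map_of_mem ((PySem.Set.mem_ofList _ _).mpr hkmem), hp⟩, hp1⟩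
  · rw [List.getElem?_eq_none (by rw [hlen]; omega),
        List.getElem?_eq_none (by simp [pvSpec]; omega)]

-- ===== VERDICT (by name: the statement is the Claim_ definition above) =====
theorem uniquify_repeated_values_spec : Claim_equal_uniquify_repeated_values := by
  intro vals us _ _
  unfold Spec_uniquify_repeated_values
  rw [pvB_eq_spec]
  unfold uniquify_repeated_values
  rw [pvA_loop vals us vals [] PySem.Dict.empty [] (fun _ h => h)
      (by intro v; simp [PySem.Dict.empty, PySem.Dict.getD, PySem.Dict.get?])]
  rw [pvCore_eq_spec vals us vals [] (by simp)]
  simp [pvSpec, List.range_eq_range']
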